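-- pv_equiv track=rewrite | github.com/yuuuuuzii/DRL-Assignment-2 | util.py | generate_symmetries
-- ===== SOURCE A (Python) =====
-- def generate_symmetries(pattern):
--     # TODO: Generate 8 symmetrical transformations of the given pattern.
--     def rotate(x, y, N, i):
--         if i == 0:
--             return (x, y)
--         elif i == 1:
--             return (y, N - 1 - x)
--         elif i == 2:
--             return (N - 1 - x, N - 1 - y)
--         elif i == 3:
--             return (N - 1 - y, x)
--
--     def mirro(x, y, N):
--         return (x, N - 1 - y)
--
--     arr = []
--
--     for i in range(4):
--         block = []
--         mir = []
--         for j in range(len(pattern)):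
--             block.append(rotate(pattern[j][0], pattern[j][1], 4, i))
--             temp = mirro(pattern[j][0],pattern[j][1], 4)
--             mir.append(rotate(temp[0], temp[1], 4, i))
--         arr.append(block)
--         arr.append(mir)
--
--     return arr
-- ===== SOURCE B (Python) =====
-- def generate_symmetries(pattern):
--     # Iterative composition: one base rotation applied repeatedly, instead of an
--     # index-based rotate ladder recomputed per point.
--     def rot(p):
--         x, y = p
--         return (y, 3 - x)
--
--     cur = [(x, y) for (x, y) in pattern]
--     cur_mir = [(x, 3 - y) for (x, y) in pattern]
--     out = []
--     for _ in range(4):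
--         out.append(cur)
--         out.append(cur_mir)
--         cur = [rot(p) for p in cur]
--         cur_mir = [rot(p) for p in cur_mir]
--     return out
-- ===== Notes on version B (the rewrite author's own statement) =====
-- stated objective: alternative
-- what changed: Replaced the 4-way if-ladder rotate(i) recomputed for every point with a single base rotation R(x,y)=(y,3-x) applied iteratively: keep the current block and its mirror, emit them, and rotate both once per round.
import Mathlib
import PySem

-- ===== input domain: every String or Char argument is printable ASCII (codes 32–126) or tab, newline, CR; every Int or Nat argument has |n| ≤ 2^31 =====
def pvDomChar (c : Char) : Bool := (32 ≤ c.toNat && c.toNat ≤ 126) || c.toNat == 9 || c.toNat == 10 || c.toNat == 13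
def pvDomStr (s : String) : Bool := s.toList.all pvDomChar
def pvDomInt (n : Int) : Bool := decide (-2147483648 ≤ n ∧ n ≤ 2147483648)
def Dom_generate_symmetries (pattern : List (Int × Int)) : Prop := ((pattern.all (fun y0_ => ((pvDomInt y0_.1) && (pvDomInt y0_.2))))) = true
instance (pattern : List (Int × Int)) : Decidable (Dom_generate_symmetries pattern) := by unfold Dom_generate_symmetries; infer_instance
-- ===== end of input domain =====

-- B replaces A's per-point if-ladder rotate(i) by one base rotation composed iteratively
-- (objective: alternative decomposition, same cost).

-- ===== PORT A =====
-- rotate(x, y, N, i); Python returns None when i ∉ {0,1,2,3}, but the caller only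
-- passes i ∈ range(4); the final branch is encoded as the last case.
def pvRotateA (x y N : Int) (i : Int) : Int × Int :=
  if i = 0 then (x, y)
  else if i = 1 then (y, N - 1 - x)
  else if i = 2 then (N - 1 - x, N - 1 - y)
  else (N - 1 - y, x)

def pvMirroA (x y N : Int) : Int × Int := (x, N - 1 - y)

-- the inner 'for j in range(len(pattern))' reads pattern[j] sequentially: a left fold
-- over pattern appending to (block, mir); the outer loop folds over range(4).
def generate_symmetries (pattern : List (Int × Int)) : List (List (Int × Int)) :=
  (PySem.List.pyRange 0 4 1).foldl
    (fun arr i =>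
      let bm := pattern.foldl
        (fun (st : List (Int × Int) × List (Int × Int)) p =>
          let temp := pvMirroA p.1 p.2 4
          (st.1 ++ [pvRotateA p.1 p.2 4 i], st.2 ++ [pvRotateA temp.1 temp.2 4 i]))
        ([], [])
      arr ++ [bm.1, bm.2])
    []

-- ===== PORT B =====
def pvRotB (p : Int × Int) : Int × Int := (p.2, 3 - p.1)

def generate_symmetries_alt (pattern : List (Int × Int)) : List (List (Int × Int)) :=
  let cur := pattern.map (fun p => (p.1, p.2))
  let curMir := pattern.map (fun p => (p.1, 3 - p.2))
  ((List.range 4).foldl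
    (fun (st : List (Int × Int) × List (Int × Int) × List (List (Int × Int))) _ =>
      (st.1.map pvRotB, st.2.1.map pvRotB, st.2.2 ++ [st.1, st.2.1]))
    (cur, curMir, [])).2.2

-- ===== PRECONDITION & SPEC =====
def Spec_generate_symmetries (pattern : List (Int × Int)) (out : List (List (Int × Int))) : Prop := out = generate_symmetries_alt pattern
instance (pattern : List (Int × Int)) (out : List (List (Int × Int))) : Decidable (Spec_generate_symmetries pattern out) := by unfold Spec_generate_symmetries; infer_instance

-- ===== CLAIM (what is proved, stated in full; the proofs are below) =====
def Claim_equal_generate_symmetries : Prop := ∀ (pattern : List (Int × Int)), Dom_generate_symmetries pattern → Spec_generate_symmetries pattern (generate_symmetries pattern)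

-- ===== LEMMAS AND PROOFS =====

-- A's paired accumulation over pattern is the pair of maps.
theorem pv_foldA_eq (pattern : List (Int × Int)) (i : Int)
    (b m : List (Int × Int)) :
    pattern.foldl
      (fun (st : List (Int × Int) × List (Int × Int)) p =>
        let temp := pvMirroA p.1 p.2 4
        (st.1 ++ [pvRotateA p.1 p.2 4 i], st.2 ++ [pvRotateA temp.1 temp.2 4 i]))
      (b, m)
    = (b ++ pattern.map (fun p => pvRotateA p.1 p.2 4 i),
       m ++ pattern.map (fun p =>
         pvRotateA (pvMirroA p.1 p.2 4).1 (pvMirroA p.1 p.2 4).2 4 i)) := by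
  induction pattern generalizing b m with
  | nil => simp
  | cons p t ih => simp [List.foldl, ih]

theorem pv_rot_map (f : Int × Int → Int × Int) (pattern : List (Int × Int)) :
    (pattern.map f).map pvRotB = pattern.map (fun p => pvRotB (f p)) := by
  simp [List.map_map, Function.comp]

-- ===== VERDICT (by name: the statement is the Claim_ definition above) =====
theorem generate_symmetries_spec : Claim_equal_generate_symmetries := by
  intro pattern _
  show generate_symmetries pattern = generate_symmetries_alt pattern
  simp only [generate_symmetries, generate_symmetries_alt,
    PySem.List.pyRange, List.range, List.range.loop, List.foldl,
    pv_foldA_eq, pv_rot_map, List.nil_append]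
  norm_num [show List.range.loop (Int.toNat 4) [] = [0,1,2,3] from by decide, pvRotateA, pvMirroA, pvRotB]
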